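-- pv_equiv track=rewrite | github.com/vaibhav-jain-dev/learning-algo | problems/200-must-solve/dynamic-programming/15-square-of-zeroes/python_code.py | largest_square_of_zeroes
-- ===== SOURCE A (Python) =====
-- from typing import List, Tuple, Optional
--
-- def has_square_of_zeroes(below: List[List[int]], right: List[List[int]],
--                          r: int, c: int, size: int) -> bool:
--     """
--     Check if square starting at (r,c) of given size has borders of all 0s.
--
--     Args:
--         below: Precomputed consecutive 0s going down
--         right: Precomputed consecutive 0s going right
--         r, c: Top-left corner
--         size: Size of the square
--
--     Returns:
--         True if borders are all 0s
--     """
--     # Check top row: need 'size' consecutive 0s going right from (r, c)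
--     top_row = right[r][c] >= size
--
--     # Check left column: need 'size' consecutive 0s going down from (r, c)
--     left_col = below[r][c] >= size
--
--     # Check bottom row: need 'size' consecutive 0s going right from (r+size-1, c)
--     bottom_row = right[r + size - 1][c] >= size
--
--     # Check right column: need 'size' consecutive 0s going down from (r, c+size-1)
--     right_col = below[r][c + size - 1] >= size
--
--     return top_row and left_col and bottom_row and right_col
--
-- def largest_square_of_zeroes(matrix: List[List[int]]) -> int:
--     """
--     Return the size of the largest square with borders of all 0s.
--
--     Args:
--         matrix: Square matrix of 0s and 1s
--
--     Returns:
--         Size of the largest valid square (0 if none exists)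
--     """
--     if not matrix or not matrix[0]:
--         return 0
--
--     n = len(matrix)
--
--     # Precompute consecutive 0s
--     below = [[0] * n for _ in range(n)]
--     right = [[0] * n for _ in range(n)]
--
--     for i in range(n - 1, -1, -1):
--         for j in range(n - 1, -1, -1):
--             if matrix[i][j] == 0:
--                 below[i][j] = 1 + (below[i + 1][j] if i + 1 < n else 0)
--                 right[i][j] = 1 + (right[i][j + 1] if j + 1 < n else 0)
--
--     max_size = 0
--
--     for r in range(n):
--         for c in range(n):
--             if matrix[r][c] != 0:
--                 continue
--
--             possible_size = min(n - r, n - c)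
--
--             for size in range(possible_size, max_size, -1):
--                 if has_square_of_zeroes(below, right, r, c, size):
--                     max_size = size
--                     break
--
--     return max_size
-- ===== SOURCE B (Python) =====
-- from typing import List
--
-- def largest_square_of_zeroes(matrix: List[List[int]]) -> int:
--     """Size-major search: try each candidate size from n down to 1 and return
--     the first size for which ANY all-zero-border square of that size exists.
--     Border tests are range-sum queries on per-row / per-column prefix counts of
--     nonzero entries; there is no per-cell candidate loop, no running maximum
--     and no pruning state."""
--     if not matrix or not matrix[0]:
--         return 0
--
--     n = len(matrix)
--
--     row_pre = []
--     for i in range(n):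
--         pre = [0]
--         for j in range(n):
--             pre.append(pre[j] + (0 if matrix[i][j] == 0 else 1))
--         row_pre.append(pre)
--
--     col_pre = []
--     for j in range(n):
--         pre = [0]
--         for i in range(n):
--             pre.append(pre[i] + (0 if matrix[i][j] == 0 else 1))
--         col_pre.append(pre)
--
--     for size in range(n, 0, -1):
--         for r in range(n - size + 1):
--             for c in range(n - size + 1):
--                 if (row_pre[r][c + size] - row_pre[r][c] == 0
--                         and row_pre[r + size - 1][c + size] - row_pre[r + size - 1][c] == 0
--                         and col_pre[c][r + size] - col_pre[c][r] == 0
--                         and col_pre[c + size - 1][r + size] - col_pre[c + size - 1][r] == 0):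
--                     return size
--     return 0
-- ===== Notes on version B (the rewrite author's own statement) =====
-- stated objective: alternative
-- what changed: B inverts the search: instead of A's cell-major scan that keeps a running maximum and prunes per-cell candidate sizes against run-length DP tables, B scans candidate sizes from n downward and returns the first size for which ANY all-zero-border square exists, testing borders by range-sum queries on per-row/per-column prefix counts of nonzero entries (no DP tables, no accumulator, no pruning state).
import Mathlib
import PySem

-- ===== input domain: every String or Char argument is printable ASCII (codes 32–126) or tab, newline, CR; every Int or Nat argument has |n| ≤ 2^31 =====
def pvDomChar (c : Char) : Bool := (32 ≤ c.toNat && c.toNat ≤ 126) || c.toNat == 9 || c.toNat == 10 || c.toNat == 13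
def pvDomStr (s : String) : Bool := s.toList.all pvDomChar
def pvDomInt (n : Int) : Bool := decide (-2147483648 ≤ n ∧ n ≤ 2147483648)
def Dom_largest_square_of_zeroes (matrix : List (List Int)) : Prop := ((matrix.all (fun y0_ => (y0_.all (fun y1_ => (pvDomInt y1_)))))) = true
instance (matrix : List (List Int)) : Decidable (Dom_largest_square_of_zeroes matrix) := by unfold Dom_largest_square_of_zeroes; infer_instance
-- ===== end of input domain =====

-- B inverts the search: a size-major scan (largest candidate size first, return on first hit,
-- no accumulator/pruning) with prefix-count range-sum border tests, instead of A's cell-major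
-- pruned scan over run-length DP tables; equal value on Pre_.

-- ===== PORT A =====

-- matrix[i][j] for 0 ≤ i, j that are in range on every input admitted by Pre_ (total helper, default 0)
def pvGet (m : List (List Int)) (i j : Nat) : Int := (m.getD i []).getD j 0

-- t[i][j] = v
def pvSet2 (t : List (List Int)) (i j : Nat) (v : Int) : List (List Int) :=
  t.set i ((t.getD i []).set j v)

-- has_square_of_zeroes
def pvHasSquare (below right : List (List Int)) (r c size : Nat) : Bool :=
  let topRow := decide ((size : Int) ≤ pvGet right r c)
  let leftCol := decide ((size : Int) ≤ pvGet below r c)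
  let bottomRow := decide ((size : Int) ≤ pvGet right (r + size - 1) c)
  let rightCol := decide ((size : Int) ≤ pvGet below r (c + size - 1))
  topRow && leftCol && bottomRow && rightCol

-- body of the precompute double loop
def pvCellStep (matrix : List (List Int)) (n : Nat)
    (st : List (List Int) × List (List Int)) (i j : Nat) : List (List Int) × List (List Int) :=
  if pvGet matrix i j = 0 then
    let below' := pvSet2 st.1 i j (1 + (if i + 1 < n then pvGet st.1 (i + 1) j else 0))
    let right' := pvSet2 st.2 i j (1 + (if j + 1 < n then pvGet st.2 i (j + 1) else 0))
    (below', right')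
  else st

-- for i in range(n-1,-1,-1): for j in range(n-1,-1,-1): …  (indices are the naturals n-1 … 0)
def pvBuild (matrix : List (List Int)) (n : Nat) : List (List Int) × List (List Int) :=
  ((List.range n).reverse).foldl
    (fun st i => ((List.range n).reverse).foldl (fun st j => pvCellStep matrix n st i j) st)
    (List.replicate n (List.replicate n 0), List.replicate n (List.replicate n 0))

-- range(hi, lo, -1) over naturals: [hi, hi-1, …, lo+1]
def pvRangeDown (hi lo : Nat) : List Nat := (List.range' (lo + 1) (hi - lo)).reverse

-- for size in …: if has_square: max_size = size; break
def pvInnerA (below right : List (List Int)) (r c : Nat) (sizes : List Nat) (maxSize : Nat) : Nat :=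
  match sizes with
  | [] => maxSize
  | s :: rest => if pvHasSquare below right r c s then s else pvInnerA below right r c rest maxSize

def largest_square_of_zeroes (matrix : List (List Int)) : Int :=
  if matrix = [] ∨ matrix.headD [] = [] then 0
  else
    let n := matrix.length
    let tbls := pvBuild matrix n
    let res : Nat :=
      (List.range n).foldl (fun maxSize r =>
        (List.range n).foldl (fun maxSize c =>
          if pvGet matrix r c ≠ 0 then maxSize
          else pvInnerA tbls.1 tbls.2 r c (pvRangeDown (min (n - r) (n - c)) maxSize) maxSize)
          maxSize) 0
    (res : Int)

-- ===== PORT B =====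

-- pre = [0]; for j in range(n): pre.append(pre[j] + (0 if matrix[i][j] == 0 else 1))
def pvPrefRow (matrix : List (List Int)) (n i : Nat) : List Int :=
  (List.range n).foldl
    (fun pre j => pre ++ [pre.getD j 0 + (if pvGet matrix i j = 0 then 0 else 1)]) [0]

-- pre = [0]; for i in range(n): pre.append(pre[i] + (0 if matrix[i][j] == 0 else 1))
def pvPrefCol (matrix : List (List Int)) (n j : Nat) : List Int :=
  (List.range n).foldl
    (fun pre i => pre ++ [pre.getD i 0 + (if pvGet matrix i j = 0 then 0 else 1)]) [0]

def pvRowPre (matrix : List (List Int)) (n : Nat) : List (List Int) :=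
  (List.range n).map (pvPrefRow matrix n)

def pvColPre (matrix : List (List Int)) (n : Nat) : List (List Int) :=
  (List.range n).map (pvPrefCol matrix n)

-- the four range-sum border tests of one candidate square
def pvBorderHit (rowPre colPre : List (List Int)) (r c s : Nat) : Bool :=
  decide (pvGet rowPre r (c + s) - pvGet rowPre r c = 0) &&
  decide (pvGet rowPre (r + s - 1) (c + s) - pvGet rowPre (r + s - 1) c = 0) &&
  decide (pvGet colPre c (r + s) - pvGet colPre c r = 0) &&
  decide (pvGet colPre (c + s - 1) (r + s) - pvGet colPre (c + s - 1) r = 0)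

-- for r in range(n-size+1): for c in range(n-size+1): if <hit>: return size
def pvAnyHit (rowPre colPre : List (List Int)) (n s : Nat) : Bool :=
  (List.range (n - s + 1)).any (fun r =>
    (List.range (n - s + 1)).any (fun c => pvBorderHit rowPre colPre r c s))

-- for size in range(n, 0, -1): if any hit at this size: return size; fall through to 0
def pvFindSize (rowPre colPre : List (List Int)) (n : Nat) : Nat → Nat
  | 0 => 0
  | s + 1 => if pvAnyHit rowPre colPre n (s + 1) then s + 1 else pvFindSize rowPre colPre n s

def largest_square_of_zeroes_alt (matrix : List (List Int)) : Int :=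
  if matrix = [] ∨ matrix.headD [] = [] then 0
  else
    let n := matrix.length
    let rowPre := pvRowPre matrix n
    let colPre := pvColPre matrix n
    ((pvFindSize rowPre colPre n n : Nat) : Int)

-- ===== PRECONDITION & SPEC =====

-- Pre_ excludes exactly the inputs on which A raises IndexError: a nonempty matrix with a
-- nonempty first row some of whose rows are shorter than len(matrix) (A indexes matrix[i][j]
-- for all i, j < n in its precompute loop).
def Pre_largest_square_of_zeroes (matrix : List (List Int)) : Prop :=
  matrix = [] ∨ matrix.headD [] = [] ∨ ∀ row ∈ matrix, matrix.length ≤ row.length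
instance (matrix : List (List Int)) : Decidable (Pre_largest_square_of_zeroes matrix) := by
  unfold Pre_largest_square_of_zeroes; infer_instance

def pvWitness_largest_square_of_zeroes : List (List Int) := [[0, 1], [1, 0]]

def Spec_largest_square_of_zeroes (matrix : List (List Int)) (out : Int) : Prop := out = largest_square_of_zeroes_alt matrix
instance (matrix : List (List Int)) (out : Int) : Decidable (Spec_largest_square_of_zeroes matrix out) := by unfold Spec_largest_square_of_zeroes; infer_instance

-- ===== CLAIM (what is proved, stated in full; the proofs are below) =====
def Claim_equal_largest_square_of_zeroes : Prop := ∀ (matrix : List (List Int)), Dom_largest_square_of_zeroes matrix → Pre_largest_square_of_zeroes matrix → Spec_largest_square_of_zeroes matrix (largest_square_of_zeroes matrix)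

-- ===== LEMMAS AND PROOFS =====

-- number of consecutive zeroes going down from (i, j): the value A's 'below' table holds
def runB (matrix : List (List Int)) (n i j : Nat) : Int :=
  if _h : i < n then (if pvGet matrix i j = 0 then 1 + runB matrix n (i + 1) j else 0) else 0
termination_by n - i

-- number of consecutive zeroes going right from (i, j): the value A's 'right' table holds
def runR (matrix : List (List Int)) (n i j : Nat) : Int :=
  if _h : j < n then (if pvGet matrix i j = 0 then 1 + runR matrix n i (j + 1) else 0) else 0
termination_by n - j

lemma runB_nonneg (matrix : List (List Int)) (n i j : Nat) : 0 ≤ runB matrix n i j := by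
  fun_induction runB matrix n i j <;> omega

lemma runR_nonneg (matrix : List (List Int)) (n i j : Nat) : 0 ≤ runR matrix n i j := by
  fun_induction runR matrix n i j <;> omega

lemma runR_ge_iff (matrix : List (List Int)) (n i : Nat) :
    ∀ (s j : Nat), j + s ≤ n →
      (((s : Int) ≤ runR matrix n i j) ↔ ∀ k < s, pvGet matrix i (j + k) = 0) := by
  intro s
  induction s with
  | zero =>
    intro j _
    simpa using runR_nonneg matrix n i j
  | succ s ih =>
    intro j h
    have hj : j < n := by omega
    rw [runR, dif_pos hj]
    by_cases hz : pvGet matrix i j = 0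
    · rw [if_pos hz]
      constructor
      · intro hle k hk
        rcases Nat.eq_zero_or_pos k with rfl | hkp
        · simpa using hz
        · have hs : (s : Int) ≤ runR matrix n i (j + 1) := by push_cast at hle ⊢; omega
          have h2 := (ih (j + 1) (by omega)).1 hs (k - 1) (by omega)
          rwa [show j + 1 + (k - 1) = j + k by omega] at h2
      · intro hall
        have hs : (s : Int) ≤ runR matrix n i (j + 1) :=
          (ih (j + 1) (by omega)).2 (fun k hk => by
            have := hall (k + 1) (by omega)
            rwa [show j + (k + 1) = j + 1 + k by omega] at this)
        push_cast; omega
    · rw [if_neg hz]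
      constructor
      · intro hle; exfalso; push_cast at hle; omega
      · intro hall; exact absurd (by simpa using hall 0 (by omega)) hz

lemma runB_ge_iff (matrix : List (List Int)) (n j : Nat) :
    ∀ (s i : Nat), i + s ≤ n →
      (((s : Int) ≤ runB matrix n i j) ↔ ∀ k < s, pvGet matrix (i + k) j = 0) := by
  intro s
  induction s with
  | zero =>
    intro i _
    simpa using runB_nonneg matrix n i j
  | succ s ih =>
    intro i h
    have hi : i < n := by omega
    rw [runB, dif_pos hi]
    by_cases hz : pvGet matrix i j = 0
    · rw [if_pos hz]
      constructor
      · intro hle k hk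
        rcases Nat.eq_zero_or_pos k with rfl | hkp
        · simpa using hz
        · have hs : (s : Int) ≤ runB matrix n (i + 1) j := by push_cast at hle ⊢; omega
          have h2 := (ih (i + 1) (by omega)).1 hs (k - 1) (by omega)
          rwa [show i + 1 + (k - 1) = i + k by omega] at h2
      · intro hall
        have hs : (s : Int) ≤ runB matrix n (i + 1) j :=
          (ih (i + 1) (by omega)).2 (fun k hk => by
            have := hall (k + 1) (by omega)
            rwa [show i + (k + 1) = i + 1 + k by omega] at this)
        push_cast; omega
    · rw [if_neg hz]
      constructor
      · intro hle; exfalso; push_cast at hle; omega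
      · intro hall; exact absurd (by simpa using hall 0 (by omega)) hz

-- table shape
def pvDims (n : Nat) (t : List (List Int)) : Prop :=
  t.length = n ∧ ∀ i, i < n → (t.getD i []).length = n

lemma dims_replicate (n : Nat) : pvDims n (List.replicate n (List.replicate n 0)) := by
  refine ⟨by simp, fun i hi => ?_⟩
  simp [List.getD_eq_getElem?_getD, hi]

lemma dims_set2 {n : Nat} {t : List (List Int)} (h : pvDims n t) (i j : Nat) (v : Int) :
    pvDims n (pvSet2 t i j v) := by
  obtain ⟨hl, hrow⟩ := h
  refine ⟨by simp [pvSet2, hl], fun i' hi' => ?_⟩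
  by_cases e : i' = i
  · subst e
    have hlt : i' < t.length := by omega
    rw [pvSet2, List.getD_eq_getElem?_getD, List.getElem?_set_self hlt]
    simpa using hrow i' hi'
  · rw [pvSet2, List.getD_eq_getElem?_getD, List.getElem?_set_ne (fun hh => e hh.symm),
      ← List.getD_eq_getElem?_getD]
    exact hrow i' hi'

lemma get_set2_self {n : Nat} {t : List (List Int)} (h : pvDims n t) {i j : Nat}
    (hi : i < n) (hj : j < n) (v : Int) : pvGet (pvSet2 t i j v) i j = v := by
  obtain ⟨hl, hrow⟩ := h
  have hlt : i < t.length := by omega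
  have hjl : j < (t.getD i []).length := by rw [hrow i hi]; exact hj
  have hrowe : (t.set i ((t.getD i []).set j v)).getD i [] = (t.getD i []).set j v := by
    rw [List.getD_eq_getElem?_getD, List.getElem?_set_self hlt]; rfl
  rw [pvGet, pvSet2, hrowe, List.getD_eq_getElem?_getD, List.getElem?_set_self hjl]; rfl

lemma row_set2_ne {t : List (List Int)} {i i' : Nat} (hne : i' ≠ i) (j : Nat) (v : Int) :
    (pvSet2 t i j v).getD i' [] = t.getD i' [] := by
  rw [pvSet2, List.getD_eq_getElem?_getD, List.getElem?_set_ne (fun hh => hne hh.symm),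
    ← List.getD_eq_getElem?_getD]

lemma get_set2_ne {t : List (List Int)} {i j i' j' : Nat} (hne : i' ≠ i ∨ j' ≠ j) (v : Int) :
    pvGet (pvSet2 t i j v) i' j' = pvGet t i' j' := by
  rcases hne with hne | hne
  · rw [pvGet, row_set2_ne hne]; rfl
  · by_cases e : i' = i
    · subst e
      by_cases hlt : i' < t.length
      · have hrowe : (t.set i' ((t.getD i' []).set j v)).getD i' [] = (t.getD i' []).set j v := by
          rw [List.getD_eq_getElem?_getD, List.getElem?_set_self hlt]; rfl
        rw [pvGet, pvSet2, hrowe, List.getD_eq_getElem?_getD,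
          List.getElem?_set_ne (fun hh => hne hh.symm), ← List.getD_eq_getElem?_getD, pvGet]
      · rw [pvGet, pvSet2, List.set_eq_of_length_le (by omega), pvGet]
    · rw [pvGet, row_set2_ne e]; rfl

lemma get_replicate_zero {n i j : Nat} : pvGet (List.replicate n (List.replicate n 0)) i j = 0 := by
  unfold pvGet
  by_cases hi : i < n
  · simp [List.getD_eq_getElem?_getD, hi]
  · simp [List.getD_eq_getElem?_getD, hi]

def pvRowFold (matrix : List (List Int)) (n i m : Nat)
    (st : List (List Int) × List (List Int)) : List (List Int) × List (List Int) :=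
  ((List.range m).reverse).foldl (fun st j => pvCellStep matrix n st i j) st

def pvAllFold (matrix : List (List Int)) (n M : Nat)
    (st : List (List Int) × List (List Int)) : List (List Int) × List (List Int) :=
  ((List.range M).reverse).foldl
    (fun st i => ((List.range n).reverse).foldl (fun st j => pvCellStep matrix n st i j) st) st

lemma pvRowFold_succ (matrix : List (List Int)) (n i m : Nat) (st : List (List Int) × List (List Int)) :
    pvRowFold matrix n i (m + 1) st = pvRowFold matrix n i m (pvCellStep matrix n st i m) := by
  rw [pvRowFold, pvRowFold, List.range_succ, List.reverse_append, List.reverse_singleton,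
    List.singleton_append, List.foldl_cons]

lemma pvAllFold_succ (matrix : List (List Int)) (n M : Nat) (st : List (List Int) × List (List Int)) :
    pvAllFold matrix n (M + 1) st = pvAllFold matrix n M (pvRowFold matrix n M n st) := by
  rw [pvAllFold, pvAllFold, List.range_succ, List.reverse_append, List.reverse_singleton,
    List.singleton_append, List.foldl_cons, pvRowFold]

lemma buildRow (matrix : List (List Int)) (n i : Nat) (hi : i < n) :
    ∀ (m : Nat) (st : List (List Int) × List (List Int)), m ≤ n →
      pvDims n st.1 → pvDims n st.2 →
      (∀ i' j', i < i' → i' < n → j' < n → pvGet st.1 i' j' = runB matrix n i' j') →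
      (∀ j', m ≤ j' → j' < n →
        pvGet st.1 i j' = runB matrix n i j' ∧ pvGet st.2 i j' = runR matrix n i j') →
      (∀ j', j' < m → pvGet st.1 i j' = 0 ∧ pvGet st.2 i j' = 0) →
      pvDims n (pvRowFold matrix n i m st).1 ∧ pvDims n (pvRowFold matrix n i m st).2 ∧
      (∀ i', i' ≠ i →
        (pvRowFold matrix n i m st).1.getD i' [] = st.1.getD i' [] ∧
        (pvRowFold matrix n i m st).2.getD i' [] = st.2.getD i' []) ∧
      (∀ j', j' < n →
        pvGet (pvRowFold matrix n i m st).1 i j' = runB matrix n i j' ∧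
        pvGet (pvRowFold matrix n i m st).2 i j' = runR matrix n i j') := by
  intro m
  induction m with
  | zero =>
    intro st _ h1 h2 _ hhi _
    exact ⟨h1, h2, fun i' _ => ⟨rfl, rfl⟩, fun j' hj' => hhi j' (Nat.zero_le _) hj'⟩
  | succ m ih =>
    intro st hm h1 h2 hlow hhi h0
    have hmn : m < n := by omega
    rw [pvRowFold_succ]
    by_cases hz : pvGet matrix i m = 0
    · have hb : (1 + (if i + 1 < n then pvGet st.1 (i + 1) m else 0)) = runB matrix n i m := by
        rw [runB, dif_pos hi, if_pos hz]
        congr 1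
        by_cases h4 : i + 1 < n
        · rw [if_pos h4, hlow (i + 1) m (by omega) h4 hmn]
        · rw [if_neg h4, runB, dif_neg (by omega)]
      have hr : (1 + (if m + 1 < n then pvGet st.2 i (m + 1) else 0)) = runR matrix n i m := by
        rw [runR, dif_pos hmn, if_pos hz]
        congr 1
        by_cases h4 : m + 1 < n
        · rw [if_pos h4, (hhi (m + 1) le_rfl h4).2]
        · rw [if_neg h4, runR, dif_neg (by omega)]
      have hcell : pvCellStep matrix n st i m =
          (pvSet2 st.1 i m (runB matrix n i m), pvSet2 st.2 i m (runR matrix n i m)) := by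
        rw [pvCellStep, if_pos hz, hb, hr]
      rw [hcell]
      have hres := ih (pvSet2 st.1 i m (runB matrix n i m), pvSet2 st.2 i m (runR matrix n i m))
        (by omega)
        (dims_set2 h1 i m _) (dims_set2 h2 i m _)
        (fun i' j' hii' hi' hj' => by
          rw [get_set2_ne (Or.inl (by omega)) _]
          exact hlow i' j' hii' hi' hj')
        (fun j' hmj' hj' => by
          by_cases e : j' = m
          · subst e
            exact ⟨get_set2_self h1 hi hmn _, get_set2_self h2 hi hmn _⟩
          · constructor
            · rw [get_set2_ne (Or.inr e) _]
              exact (hhi j' (by omega) hj').1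
            · rw [get_set2_ne (Or.inr e) _]
              exact (hhi j' (by omega) hj').2)
        (fun j' hj' => by
          rw [get_set2_ne (Or.inr (by omega)) _, get_set2_ne (Or.inr (by omega)) _]
          exact h0 j' (by omega))
      refine ⟨hres.1, hres.2.1, ?_, hres.2.2.2⟩
      intro i' hii'
      refine ⟨?_, ?_⟩
      · rw [(hres.2.2.1 i' hii').1, row_set2_ne hii' _ _]
      · rw [(hres.2.2.1 i' hii').2, row_set2_ne hii' _ _]
    · have hcell : pvCellStep matrix n st i m = st := by rw [pvCellStep, if_neg hz]
      rw [hcell]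
      exact ih st (by omega) h1 h2 hlow
        (fun j' hmj' hj' => by
          by_cases e : j' = m
          · constructor
            · rw [e, (h0 m (by omega)).1, runB, dif_pos hi, if_neg hz]
            · rw [e, (h0 m (by omega)).2, runR, dif_pos hmn, if_neg hz]
          · exact hhi j' (by omega) hj')
        (fun j' hj' => h0 j' (by omega))

lemma buildAll (matrix : List (List Int)) (n : Nat) :
    ∀ (M : Nat) (st : List (List Int) × List (List Int)), M ≤ n →
      pvDims n st.1 → pvDims n st.2 →
      (∀ i' j', M ≤ i' → i' < n → j' < n →
        pvGet st.1 i' j' = runB matrix n i' j' ∧ pvGet st.2 i' j' = runR matrix n i' j') →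
      (∀ i' j', i' < M → j' < n → pvGet st.1 i' j' = 0 ∧ pvGet st.2 i' j' = 0) →
      ∀ i' j', i' < n → j' < n →
        pvGet (pvAllFold matrix n M st).1 i' j' = runB matrix n i' j' ∧
        pvGet (pvAllFold matrix n M st).2 i' j' = runR matrix n i' j' := by
  intro M
  induction M with
  | zero =>
    intro st _ _ _ hcor _
    exact fun i' j' hi' hj' => hcor i' j' (Nat.zero_le _) hi' hj'
  | succ M ih =>
    intro st hM h1 h2 hcor h0
    have hMn : M < n := by omega
    rw [pvAllFold_succ]
    have hrow := buildRow matrix n M hMn n st le_rfl h1 h2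
      (fun i' j' hMi' hi' hj' => (hcor i' j' (by omega) hi' hj').1)
      (fun j' hnj' hj' => by omega)
      (fun j' hj' => h0 M j' (by omega) hj')
    obtain ⟨hd1, hd2, hrows, hrowM⟩ := hrow
    exact ih (pvRowFold matrix n M n st) (by omega) hd1 hd2
      (fun i' j' hMi' hi' hj' => by
        by_cases e : i' = M
        · subst e
          exact hrowM j' hj'
        · constructor
          · rw [pvGet, (hrows i' e).1, ← pvGet]
            exact (hcor i' j' (by omega) hi' hj').1
          · rw [pvGet, (hrows i' e).2, ← pvGet]
            exact (hcor i' j' (by omega) hi' hj').2)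
      (fun i' j' hi' hj' => by
        have hne : i' ≠ M := by omega
        constructor
        · rw [pvGet, (hrows i' hne).1, ← pvGet]
          exact (h0 i' j' (by omega) hj').1
        · rw [pvGet, (hrows i' hne).2, ← pvGet]
          exact (h0 i' j' (by omega) hj').2)

lemma build_char (matrix : List (List Int)) (n : Nat) :
    ∀ i j, i < n → j < n →
      pvGet (pvBuild matrix n).1 i j = runB matrix n i j ∧
      pvGet (pvBuild matrix n).2 i j = runR matrix n i j := by
  intro i j hi hj
  have he : pvBuild matrix n = pvAllFold matrix n n
      (List.replicate n (List.replicate n 0), List.replicate n (List.replicate n 0)) := rfl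
  rw [he]
  exact buildAll matrix n n
    (List.replicate n (List.replicate n 0), List.replicate n (List.replicate n 0)) le_rfl
    (dims_replicate n) (dims_replicate n)
    (fun i' j' h1 h2 _ => by omega)
    (fun i' j' _ _ => ⟨get_replicate_zero, get_replicate_zero⟩)
    i j hi hj

lemma mem_rangeDown {s hi lo : Nat} (h : s ∈ pvRangeDown hi lo) : lo < s ∧ s ≤ hi := by
  simp [pvRangeDown, List.mem_range'] at h; omega

-- prefix counts of nonzero entries: the values B's tables hold
def cntR (matrix : List (List Int)) (i : Nat) : Nat → Int
  | 0 => 0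
  | k + 1 => cntR matrix i k + (if pvGet matrix i k = 0 then 0 else 1)

def cntC (matrix : List (List Int)) (j : Nat) : Nat → Int
  | 0 => 0
  | k + 1 => cntC matrix j k + (if pvGet matrix k j = 0 then 0 else 1)

lemma prefRow_aux (matrix : List (List Int)) (i : Nat) :
    ∀ m, ((List.range m).foldl
        (fun pre j => pre ++ [pre.getD j 0 + (if pvGet matrix i j = 0 then 0 else 1)]) ([0] : List Int)).length
          = m + 1 ∧
      ∀ k ≤ m, ((List.range m).foldl
        (fun pre j => pre ++ [pre.getD j 0 + (if pvGet matrix i j = 0 then 0 else 1)]) ([0] : List Int)).getD k 0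
          = cntR matrix i k := by
  intro m
  induction m with
  | zero => exact ⟨rfl, fun k hk => by interval_cases k; rfl⟩
  | succ m ih =>
    obtain ⟨hlen, hval⟩ := ih
    have hstep : (List.range (m + 1)).foldl
        (fun pre j => pre ++ [pre.getD j 0 + (if pvGet matrix i j = 0 then 0 else 1)]) ([0] : List Int) =
        ((List.range m).foldl
          (fun pre j => pre ++ [pre.getD j 0 + (if pvGet matrix i j = 0 then 0 else 1)]) ([0] : List Int)) ++
        [((List.range m).foldl
          (fun pre j => pre ++ [pre.getD j 0 + (if pvGet matrix i j = 0 then 0 else 1)]) ([0] : List Int)).getD m 0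
          + (if pvGet matrix i m = 0 then 0 else 1)] := by
      rw [List.range_succ, List.foldl_append, List.foldl_cons, List.foldl_nil]
    constructor
    · rw [hstep, List.length_append, hlen]; rfl
    · intro k hk
      simp only [hstep]
      by_cases hkm : k ≤ m
      · rw [List.getD_eq_getElem?_getD, List.getElem?_append_left (by rw [hlen]; omega),
          ← List.getD_eq_getElem?_getD]
        exact hval k hkm
      · have hk1 : k = m + 1 := by omega
        subst hk1
        rw [List.getD_eq_getElem?_getD, List.getElem?_append_right hlen.le, hlen]
        simp only [Nat.sub_self, List.getElem?_cons_zero, Option.getD_some]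
        rw [hval m le_rfl]
        rfl

lemma prefCol_aux (matrix : List (List Int)) (j : Nat) :
    ∀ m, ((List.range m).foldl
        (fun pre i => pre ++ [pre.getD i 0 + (if pvGet matrix i j = 0 then 0 else 1)]) ([0] : List Int)).length
          = m + 1 ∧
      ∀ k ≤ m, ((List.range m).foldl
        (fun pre i => pre ++ [pre.getD i 0 + (if pvGet matrix i j = 0 then 0 else 1)]) ([0] : List Int)).getD k 0
          = cntC matrix j k := by
  intro m
  induction m with
  | zero => exact ⟨rfl, fun k hk => by interval_cases k; rfl⟩
  | succ m ih =>
    obtain ⟨hlen, hval⟩ := ih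
    have hstep : (List.range (m + 1)).foldl
        (fun pre i => pre ++ [pre.getD i 0 + (if pvGet matrix i j = 0 then 0 else 1)]) ([0] : List Int) =
        ((List.range m).foldl
          (fun pre i => pre ++ [pre.getD i 0 + (if pvGet matrix i j = 0 then 0 else 1)]) ([0] : List Int)) ++
        [((List.range m).foldl
          (fun pre i => pre ++ [pre.getD i 0 + (if pvGet matrix i j = 0 then 0 else 1)]) ([0] : List Int)).getD m 0
          + (if pvGet matrix m j = 0 then 0 else 1)] := by
      rw [List.range_succ, List.foldl_append, List.foldl_cons, List.foldl_nil]
    constructor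
    · rw [hstep, List.length_append, hlen]; rfl
    · intro k hk
      simp only [hstep]
      by_cases hkm : k ≤ m
      · rw [List.getD_eq_getElem?_getD, List.getElem?_append_left (by rw [hlen]; omega),
          ← List.getD_eq_getElem?_getD]
        exact hval k hkm
      · have hk1 : k = m + 1 := by omega
        subst hk1
        rw [List.getD_eq_getElem?_getD, List.getElem?_append_right hlen.le, hlen]
        simp only [Nat.sub_self, List.getElem?_cons_zero, Option.getD_some]
        rw [hval m le_rfl]
        rfl

lemma rowPre_get (matrix : List (List Int)) (n : Nat) {i k : Nat} (hi : i < n) (hk : k ≤ n) :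
    pvGet (pvRowPre matrix n) i k = cntR matrix i k := by
  have hrow : (pvRowPre matrix n).getD i [] = pvPrefRow matrix n i := by
    rw [pvRowPre, List.getD_eq_getElem?_getD, List.getElem?_map, List.getElem?_range hi]
    rfl
  rw [pvGet, hrow, pvPrefRow]
  exact (prefRow_aux matrix i n).2 k hk

lemma colPre_get (matrix : List (List Int)) (n : Nat) {j k : Nat} (hj : j < n) (hk : k ≤ n) :
    pvGet (pvColPre matrix n) j k = cntC matrix j k := by
  have hrow : (pvColPre matrix n).getD j [] = pvPrefCol matrix n j := by
    rw [pvColPre, List.getD_eq_getElem?_getD, List.getElem?_map, List.getElem?_range hj]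
    rfl
  rw [pvGet, hrow, pvPrefCol]
  exact (prefCol_aux matrix j n).2 k hk

lemma cntR_mono (matrix : List (List Int)) (i : Nat) :
    ∀ s c, cntR matrix i c ≤ cntR matrix i (c + s) := by
  intro s
  induction s with
  | zero => intro c; exact le_rfl
  | succ s ih =>
    intro c
    have := ih c
    rw [show c + (s + 1) = (c + s) + 1 by omega, cntR]
    split <;> omega

lemma cntC_mono (matrix : List (List Int)) (j : Nat) :
    ∀ s c, cntC matrix j c ≤ cntC matrix j (c + s) := by
  intro s
  induction s with
  | zero => intro c; exact le_rfl
  | succ s ih =>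
    intro c
    have := ih c
    rw [show c + (s + 1) = (c + s) + 1 by omega, cntC]
    split <;> omega

lemma cntR_diff_iff (matrix : List (List Int)) (i : Nat) :
    ∀ s c, (cntR matrix i (c + s) - cntR matrix i c = 0 ↔ ∀ k < s, pvGet matrix i (c + k) = 0) := by
  intro s
  induction s with
  | zero => intro c; simp
  | succ s ih =>
    intro c
    rw [show c + (s + 1) = (c + s) + 1 by omega, cntR]
    have hm := cntR_mono matrix i s c
    constructor
    · intro h k hk
      by_cases hz : pvGet matrix i (c + s) = 0
      · rw [if_pos hz] at h
        rcases Nat.lt_succ_iff_lt_or_eq.mp hk with hk' | hk'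
        · exact (ih c).mp (by omega) k hk'
        · rwa [hk']
      · rw [if_neg hz] at h; omega
    · intro hall
      have h1 := (ih c).mpr (fun k hk => hall k (by omega))
      rw [if_pos (hall s (by omega))]
      omega

lemma cntC_diff_iff (matrix : List (List Int)) (j : Nat) :
    ∀ s c, (cntC matrix j (c + s) - cntC matrix j c = 0 ↔ ∀ k < s, pvGet matrix (c + k) j = 0) := by
  intro s
  induction s with
  | zero => intro c; simp
  | succ s ih =>
    intro c
    rw [show c + (s + 1) = (c + s) + 1 by omega, cntC]
    have hm := cntC_mono matrix j s c
    constructor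
    · intro h k hk
      by_cases hz : pvGet matrix (c + s) j = 0
      · rw [if_pos hz] at h
        rcases Nat.lt_succ_iff_lt_or_eq.mp hk with hk' | hk'
        · exact (ih c).mp (by omega) k hk'
        · rwa [hk']
      · rw [if_neg hz] at h; omega
    · intro hall
      have h1 := (ih c).mpr (fun k hk => hall k (by omega))
      rw [if_pos (hall s (by omega))]
      omega

lemma test_eq (matrix : List (List Int)) (n : Nat) {r c s : Nat}
    (hs1 : 1 ≤ s) (hsr : s ≤ n - r) (hsc : s ≤ n - c)
    (hchar : ∀ i j, i < n → j < n →
      pvGet (pvBuild matrix n).1 i j = runB matrix n i j ∧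
      pvGet (pvBuild matrix n).2 i j = runR matrix n i j) :
    pvHasSquare (pvBuild matrix n).1 (pvBuild matrix n).2 r c s =
      pvBorderHit (pvRowPre matrix n) (pvColPre matrix n) r c s := by
  have hr : r < n := by omega
  have hc : c < n := by omega
  have hbr : r + s - 1 < n := by omega
  have hcr : c + s - 1 < n := by omega
  have booleq : ∀ (P Q : Prop) (instP : Decidable P) (instQ : Decidable Q), (P ↔ Q) →
      @decide P instP = @decide Q instQ := by
    intro P Q instP instQ h
    by_cases hp : P
    · rw [decide_eq_true hp, decide_eq_true (h.mp hp)]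
    · rw [decide_eq_false hp, decide_eq_false (fun hq => hp (h.mpr hq))]
  have eTop : decide ((s : Int) ≤ pvGet (pvBuild matrix n).2 r c) =
      decide (pvGet (pvRowPre matrix n) r (c + s) - pvGet (pvRowPre matrix n) r c = 0) := by
    apply booleq
    rw [(hchar r c hr hc).2, runR_ge_iff matrix n r s c (by omega),
      rowPre_get matrix n hr (by omega), rowPre_get matrix n hr (by omega)]
    exact (cntR_diff_iff matrix r s c).symm
  have eBot : decide ((s : Int) ≤ pvGet (pvBuild matrix n).2 (r + s - 1) c) =
      decide (pvGet (pvRowPre matrix n) (r + s - 1) (c + s)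
        - pvGet (pvRowPre matrix n) (r + s - 1) c = 0) := by
    apply booleq
    rw [(hchar (r + s - 1) c hbr hc).2, runR_ge_iff matrix n (r + s - 1) s c (by omega),
      rowPre_get matrix n hbr (by omega), rowPre_get matrix n hbr (by omega)]
    exact (cntR_diff_iff matrix (r + s - 1) s c).symm
  have eLeft : decide ((s : Int) ≤ pvGet (pvBuild matrix n).1 r c) =
      decide (pvGet (pvColPre matrix n) c (r + s) - pvGet (pvColPre matrix n) c r = 0) := by
    apply booleq
    rw [(hchar r c hr hc).1, runB_ge_iff matrix n c s r (by omega),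
      colPre_get matrix n hc (by omega), colPre_get matrix n hc (by omega)]
    exact (cntC_diff_iff matrix c s r).symm
  have eRight : decide ((s : Int) ≤ pvGet (pvBuild matrix n).1 r (c + s - 1)) =
      decide (pvGet (pvColPre matrix n) (c + s - 1) (r + s)
        - pvGet (pvColPre matrix n) (c + s - 1) r = 0) := by
    apply booleq
    rw [(hchar r (c + s - 1) hr hcr).1, runB_ge_iff matrix n (c + s - 1) s r (by omega),
      colPre_get matrix n hcr (by omega), colPre_get matrix n hcr (by omega)]
    exact (cntC_diff_iff matrix (c + s - 1) s r).symm
  rw [pvHasSquare, pvBorderHit, eTop, eBot, eLeft, eRight]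
  generalize h1 : decide (pvGet (pvRowPre matrix n) r (c + s) - pvGet (pvRowPre matrix n) r c = 0) = b1
  generalize h2 : decide (pvGet (pvRowPre matrix n) (r + s - 1) (c + s)
    - pvGet (pvRowPre matrix n) (r + s - 1) c = 0) = b2
  generalize h3 : decide (pvGet (pvColPre matrix n) c (r + s) - pvGet (pvColPre matrix n) c r = 0) = b3
  generalize h4 : decide (pvGet (pvColPre matrix n) (c + s - 1) (r + s)
    - pvGet (pvColPre matrix n) (c + s - 1) r = 0) = b4
  cases b1 <;> cases b2 <;> cases b3 <;> cases b4 <;> rfl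

-- proof-side mirror of A's pruned inner scan, phrased over B's border test
def pvInnerB (rowPre colPre : List (List Int)) (r c : Nat) (sizes : List Nat) (best : Nat) : Nat :=
  match sizes with
  | [] => best
  | s :: rest => if pvBorderHit rowPre colPre r c s then s
                 else pvInnerB rowPre colPre r c rest best

lemma inner_eq (below right rowPre colPre : List (List Int)) (r c : Nat) :
    ∀ (sizes : List Nat) (best : Nat),
      (∀ s ∈ sizes, pvHasSquare below right r c s = pvBorderHit rowPre colPre r c s) →
      pvInnerA below right r c sizes best = pvInnerB rowPre colPre r c sizes best := by
  intro sizes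
  induction sizes with
  | nil => intro best _; rfl
  | cons s rest ih =>
    intro best hall
    rw [pvInnerA, pvInnerB, hall s (List.mem_cons_self)]
    split
    · rfl
    · exact ih best (fun s' hs' => hall s' (List.mem_cons_of_mem _ hs'))

lemma foldl_congr_all {α β : Type} (l : List α) (f g : β → α → β) (b : β)
    (h : ∀ a ∈ l, ∀ acc, f acc a = g acc a) : l.foldl f b = l.foldl g b := by
  induction l generalizing b with
  | nil => rfl
  | cons x xs ih => simp only [List.foldl_cons, h x (by simp)]; exact ih _ (fun a ha acc => h a (List.mem_cons_of_mem _ ha) acc)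

-- "some square of size s has all-zero borders" according to the prefix tables
def pvP (rp cp : List (List Int)) (n s : Nat) : Prop :=
  1 ≤ s ∧ ∃ r c : Nat, r + s ≤ n ∧ c + s ≤ n ∧ pvBorderHit rp cp r c s = true

lemma hit_zero (matrix : List (List Int)) (n : Nat) {r c s : Nat}
    (hs : 1 ≤ s) (hr : r + s ≤ n) (hc : c + s ≤ n)
    (hhit : pvBorderHit (pvRowPre matrix n) (pvColPre matrix n) r c s = true) :
    pvGet matrix r c = 0 := by
  have hrn : r < n := by omega
  have htop : pvGet (pvRowPre matrix n) r (c + s) - pvGet (pvRowPre matrix n) r c = 0 := by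
    simp only [pvBorderHit, Bool.and_eq_true, decide_eq_true_eq] at hhit
    exact hhit.1.1.1
  rw [rowPre_get matrix n hrn (by omega), rowPre_get matrix n hrn (by omega)] at htop
  have := (cntR_diff_iff matrix r s c).1 htop 0 (by omega)
  simpa using this

lemma pvRangeDown_empty {hi lo : Nat} (h : hi ≤ lo) : pvRangeDown hi lo = [] := by
  rw [pvRangeDown, Nat.sub_eq_zero_of_le h, List.range'_zero, List.reverse_nil]

lemma pvRangeDown_cons (d m : Nat) :
    pvRangeDown (m + (d + 1)) m = (m + (d + 1)) :: pvRangeDown (m + d) m := by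
  rw [pvRangeDown, pvRangeDown, Nat.add_sub_cancel_left, Nat.add_sub_cancel_left,
    List.range'_1_concat, List.reverse_append, List.reverse_singleton, List.singleton_append]
  congr 1
  omega

lemma innerB_down_spec (rp cp : List (List Int)) (r c : Nat) :
    ∀ (d m : Nat),
      m ≤ pvInnerB rp cp r c (pvRangeDown (m + d) m) m ∧
      (pvInnerB rp cp r c (pvRangeDown (m + d) m) m = m ∨
        (m < pvInnerB rp cp r c (pvRangeDown (m + d) m) m ∧
         pvInnerB rp cp r c (pvRangeDown (m + d) m) m ≤ m + d ∧
         pvBorderHit rp cp r c (pvInnerB rp cp r c (pvRangeDown (m + d) m) m) = true)) ∧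
      (∀ s, m < s → s ≤ m + d → pvBorderHit rp cp r c s = true →
        s ≤ pvInnerB rp cp r c (pvRangeDown (m + d) m) m) := by
  intro d
  induction d with
  | zero =>
    intro m
    rw [Nat.add_zero, pvRangeDown_empty le_rfl, pvInnerB]
    exact ⟨le_rfl, Or.inl rfl, fun s h1 h2 _ => by omega⟩
  | succ d ih =>
    intro m
    rw [pvRangeDown_cons d m, pvInnerB]
    by_cases hhit : pvBorderHit rp cp r c (m + (d + 1)) = true
    · rw [if_pos hhit]
      exact ⟨by omega, Or.inr ⟨by omega, le_rfl, hhit⟩, fun s h1 h2 _ => by omega⟩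
    · rw [if_neg hhit]
      obtain ⟨ih1, ih2, ih3⟩ := ih m
      refine ⟨ih1, by tauto, fun s h1 h2 hs => ?_⟩
      by_cases he : s = m + (d + 1)
      · exact absurd (he ▸ hs) hhit
      · exact ih3 s h1 (by omega) hs

lemma innerB_spec (rp cp : List (List Int)) (r c hi m : Nat) :
    m ≤ pvInnerB rp cp r c (pvRangeDown hi m) m ∧
    (pvInnerB rp cp r c (pvRangeDown hi m) m = m ∨
      (m < pvInnerB rp cp r c (pvRangeDown hi m) m ∧
       pvInnerB rp cp r c (pvRangeDown hi m) m ≤ hi ∧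
       pvBorderHit rp cp r c (pvInnerB rp cp r c (pvRangeDown hi m) m) = true)) ∧
    (∀ s, m < s → s ≤ hi → pvBorderHit rp cp r c s = true →
      s ≤ pvInnerB rp cp r c (pvRangeDown hi m) m) := by
  by_cases h : hi ≤ m
  · rw [pvRangeDown_empty h, pvInnerB]
    exact ⟨le_rfl, Or.inl rfl, fun s h1 h2 _ => by omega⟩
  · have he : hi = m + (hi - m) := by omega
    rw [he]
    exact innerB_down_spec rp cp r c (hi - m) m

-- one cell of A's scan, after its border test has been rewritten to B's tables
def pvCellB (matrix : List (List Int)) (n m r c : Nat) : Nat :=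
  if pvGet matrix r c ≠ 0 then m
  else pvInnerB (pvRowPre matrix n) (pvColPre matrix n) r c
    (pvRangeDown (min (n - r) (n - c)) m) m

lemma rowScan_spec (matrix : List (List Int)) (n r : Nat) (hr : r < n) :
    ∀ (k : Nat), k ≤ n → ∀ m,
      m ≤ (List.range k).foldl (fun m c => pvCellB matrix n m r c) m ∧
      ((List.range k).foldl (fun m c => pvCellB matrix n m r c) m = m ∨
        pvP (pvRowPre matrix n) (pvColPre matrix n) n
          ((List.range k).foldl (fun m c => pvCellB matrix n m r c) m)) ∧
      (∀ c s, c < k → 1 ≤ s → r + s ≤ n → c + s ≤ n →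
        pvBorderHit (pvRowPre matrix n) (pvColPre matrix n) r c s = true →
        s ≤ (List.range k).foldl (fun m c => pvCellB matrix n m r c) m) := by
  intro k
  induction k with
  | zero =>
    intro _ m
    exact ⟨le_rfl, Or.inl rfl, fun c s hc _ _ _ _ => by omega⟩
  | succ k ih =>
    intro hk m
    obtain ⟨ih1, ih2, ih3⟩ := ih (by omega) m
    have hkn : k < n := by omega
    have hstep : (List.range (k + 1)).foldl (fun m c => pvCellB matrix n m r c) m =
        pvCellB matrix n ((List.range k).foldl (fun m c => pvCellB matrix n m r c) m) r k := by
      rw [List.range_succ, List.foldl_append, List.foldl_cons, List.foldl_nil]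
    set m1 := (List.range k).foldl (fun m c => pvCellB matrix n m r c) m with hm1
    rw [hstep]
    by_cases hz : pvGet matrix r k ≠ 0
    · rw [pvCellB, if_pos hz]
      refine ⟨ih1, ih2, fun c s hc hs hrs hcs hhit => ?_⟩
      by_cases he : c = k
      · exact absurd (hit_zero matrix n hs hrs (he ▸ hcs) (he ▸ hhit)) (he ▸ hz)
      · exact ih3 c s (by omega) hs hrs hcs hhit
    · rw [pvCellB, if_neg hz]
      obtain ⟨j1, j2, j3⟩ := innerB_spec (pvRowPre matrix n) (pvColPre matrix n) r k
        (min (n - r) (n - k)) m1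
      refine ⟨le_trans ih1 j1, ?_, fun c s hc hs hrs hcs hhit => ?_⟩
      · rcases j2 with j2 | ⟨ja, jb, jc⟩
        · rw [j2]; exact ih2
        · exact Or.inr ⟨by omega, r, k, by omega, by omega, jc⟩
      · by_cases he : c = k
        · subst he
          by_cases hsle : s ≤ m1
          · omega
          · exact j3 s (by omega) (by omega) hhit
        · exact le_trans (ih3 c s (by omega) hs hrs hcs hhit) j1

lemma outerScan_spec (matrix : List (List Int)) (n : Nat) :
    ∀ (k : Nat), k ≤ n → ∀ m,
      m ≤ (List.range k).foldl
            (fun m r => (List.range n).foldl (fun m c => pvCellB matrix n m r c) m) m ∧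
      ((List.range k).foldl
          (fun m r => (List.range n).foldl (fun m c => pvCellB matrix n m r c) m) m = m ∨
        pvP (pvRowPre matrix n) (pvColPre matrix n) n
          ((List.range k).foldl
            (fun m r => (List.range n).foldl (fun m c => pvCellB matrix n m r c) m) m)) ∧
      (∀ r c s, r < k → 1 ≤ s → r + s ≤ n → c + s ≤ n →
        pvBorderHit (pvRowPre matrix n) (pvColPre matrix n) r c s = true →
        s ≤ (List.range k).foldl
              (fun m r => (List.range n).foldl (fun m c => pvCellB matrix n m r c) m) m) := by
  intro k
  induction k with
  | zero =>
    intro _ m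
    exact ⟨le_rfl, Or.inl rfl, fun r c s hrk _ _ _ _ => by omega⟩
  | succ k ih =>
    intro hk m
    obtain ⟨ih1, ih2, ih3⟩ := ih (by omega) m
    have hkn : k < n := by omega
    have hstep : (List.range (k + 1)).foldl
        (fun m r => (List.range n).foldl (fun m c => pvCellB matrix n m r c) m) m =
        (List.range n).foldl (fun m c => pvCellB matrix n m k c)
          ((List.range k).foldl
            (fun m r => (List.range n).foldl (fun m c => pvCellB matrix n m r c) m) m) := by
      rw [List.range_succ, List.foldl_append, List.foldl_cons, List.foldl_nil]
    set m1 := (List.range k).foldl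
      (fun m r => (List.range n).foldl (fun m c => pvCellB matrix n m r c) m) m with hm1
    rw [hstep]
    obtain ⟨j1, j2, j3⟩ := rowScan_spec matrix n k hkn n le_rfl m1
    refine ⟨le_trans ih1 j1, ?_, fun r c s hrk hs hrs hcs hhit => ?_⟩
    · rcases j2 with j2 | j2
      · rw [j2]; exact ih2
      · exact Or.inr j2
    · by_cases he : r = k
      · subst he
        exact j3 c s (by omega) hs hrs hcs hhit
      · exact le_trans (ih3 r c s (by omega) hs hrs hcs hhit) j1

lemma anyHit_iff (rp cp : List (List Int)) (n s : Nat) (hs : 1 ≤ s) (hsn : s ≤ n) :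
    pvAnyHit rp cp n s = true ↔
      ∃ r c : Nat, r + s ≤ n ∧ c + s ≤ n ∧ pvBorderHit rp cp r c s = true := by
  rw [pvAnyHit]
  simp only [List.any_eq_true, List.mem_range]
  constructor
  · rintro ⟨r, hr, c, hc, hhit⟩
    exact ⟨r, c, by omega, by omega, hhit⟩
  · rintro ⟨r, c, hr, hc, hhit⟩
    exact ⟨r, by omega, c, by omega, hhit⟩

lemma findSize_spec (rp cp : List (List Int)) (n : Nat) :
    ∀ k, k ≤ n →
      (pvFindSize rp cp n k = 0 ∨
        (pvFindSize rp cp n k ≤ k ∧ pvP rp cp n (pvFindSize rp cp n k))) ∧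
      (∀ s, s ≤ k → pvP rp cp n s → s ≤ pvFindSize rp cp n k) := by
  intro k
  induction k with
  | zero =>
    exact fun _ => ⟨Or.inl rfl, fun s hs hp => by omega⟩
  | succ k ih =>
    intro hk
    obtain ⟨ih1, ih2⟩ := ih (by omega)
    rw [pvFindSize]
    by_cases hany : pvAnyHit rp cp n (k + 1) = true
    · rw [if_pos hany]
      obtain ⟨r, c, hr, hc, hhit⟩ := (anyHit_iff rp cp n (k + 1) (by omega) hk).1 hany
      exact ⟨Or.inr ⟨le_rfl, by omega, r, c, hr, hc, hhit⟩, fun s hs _ => by omega⟩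
    · rw [if_neg hany]
      refine ⟨?_, fun s _hs hp => ?_⟩
      · rcases ih1 with h | h
        · exact Or.inl h
        · exact Or.inr ⟨by omega, h.2⟩
      · by_cases he : s = k + 1
        · rw [he] at hp
          exact absurd ((anyHit_iff rp cp n (k + 1) hp.1 hk).2 hp.2) hany
        · exact ih2 s (by omega) hp

lemma max_unique (rp cp : List (List Int)) (n x y : Nat)
    (hx1 : x = 0 ∨ pvP rp cp n x) (hx2 : ∀ s, s ≤ n → pvP rp cp n s → s ≤ x)
    (hy1 : y = 0 ∨ pvP rp cp n y) (hy2 : ∀ s, s ≤ n → pvP rp cp n s → s ≤ y) : x = y := by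
  have hbound : ∀ z : Nat, pvP rp cp n z → z ≤ n := by
    rintro z ⟨hz, r, c, hr, _, _⟩
    omega
  rcases hx1 with hx1 | hx1
  · rcases hy1 with hy1 | hy1
    · omega
    · have := hx2 y (hbound y hy1) hy1
      have := hy1.1
      omega
  · rcases hy1 with hy1 | hy1
    · have := hy2 x (hbound x hx1) hx1
      have := hx1.1
      omega
    · have h1 := hx2 y (hbound y hy1) hy1
      have h2 := hy2 x (hbound x hx1) hx1
      omega

-- ===== VERDICT (by name: the statement is the Claim_ definition above) =====
theorem largest_square_of_zeroes_spec : Claim_equal_largest_square_of_zeroes := by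
  intro matrix _dom _pre
  unfold Spec_largest_square_of_zeroes
  by_cases hg : matrix = [] ∨ matrix.headD [] = []
  · rw [largest_square_of_zeroes, largest_square_of_zeroes_alt, if_pos hg, if_pos hg]
  · rw [largest_square_of_zeroes, largest_square_of_zeroes_alt, if_neg hg, if_neg hg]
    refine congrArg (fun r : Nat => (r : Int)) ?_
    set n := matrix.length with hn
    -- A's fold, with its run-length border test rewritten to B's prefix-table test
    have hA : (List.range n).foldl (fun maxSize r =>
        (List.range n).foldl (fun maxSize c =>
          if pvGet matrix r c ≠ 0 then maxSize
          else pvInnerA (pvBuild matrix n).1 (pvBuild matrix n).2 r c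
            (pvRangeDown (min (n - r) (n - c)) maxSize) maxSize) maxSize) 0 =
        (List.range n).foldl
          (fun m r => (List.range n).foldl (fun m c => pvCellB matrix n m r c) m) 0 := by
      apply foldl_congr_all
      intro r hr acc
      apply foldl_congr_all
      intro c hc acc'
      simp only [List.mem_range] at hr hc
      rw [pvCellB]
      by_cases hz : pvGet matrix r c = 0
      · rw [if_neg (by simp [hz]), if_neg (by simp [hz])]
        refine inner_eq _ _ _ _ r c _ acc' ?_
        intro s hs
        obtain ⟨hlo, hhi2⟩ := mem_rangeDown hs
        exact test_eq matrix n (by omega) (by omega) (by omega) (build_char matrix n)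
      · rw [if_pos hz, if_pos hz]
    rw [hA]
    obtain ⟨_, hA2, hA3⟩ := outerScan_spec matrix n n le_rfl 0
    obtain ⟨hB1, hB2⟩ := findSize_spec (pvRowPre matrix n) (pvColPre matrix n) n n le_rfl
    refine max_unique (pvRowPre matrix n) (pvColPre matrix n) n _ _ hA2 ?_ ?_ hB2
    · rintro s hsn ⟨hs, r, c, hr, hc, hhit⟩
      exact hA3 r c s (by omega) hs hr hc hhit
    · rcases hB1 with h | h
      · exact Or.inl h
      · exact Or.inr h.2
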